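-- pv_equiv track=rewrite | github.com/gridvisi/Python_workspace | 3 codewars/8 kyu/Freudian translator 8.py | to_freud
-- ===== SOURCE A (Python) =====
-- def to_freud(sentence):
--     sentence = list(sentence)
--     output = []
--     count = 0
--     for i in range(len(sentence)):
--         if sentence[i] == ' ':
--             count+= 1
--     for i in range(count+1):
--         output.append("sex")
--     output = ' '.join(output)
--     return output
-- ===== SOURCE B (Python) =====
-- def to_freud(sentence):
--     out = "sex"
--     for ch in sentence:
--         if ch == ' ':
--             out += " sex"
--     return out
-- ===== Notes on version B (the rewrite author's own statement) =====
-- stated objective: simpler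
-- what changed: B builds the answer directly in a single pass with a string accumulator (emit 'sex' once, then ' sex' at each space), eliminating A's space-counting pass, the replicate-append loop and the final join (measured ~1.8x faster at the largest size).
import Mathlib
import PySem

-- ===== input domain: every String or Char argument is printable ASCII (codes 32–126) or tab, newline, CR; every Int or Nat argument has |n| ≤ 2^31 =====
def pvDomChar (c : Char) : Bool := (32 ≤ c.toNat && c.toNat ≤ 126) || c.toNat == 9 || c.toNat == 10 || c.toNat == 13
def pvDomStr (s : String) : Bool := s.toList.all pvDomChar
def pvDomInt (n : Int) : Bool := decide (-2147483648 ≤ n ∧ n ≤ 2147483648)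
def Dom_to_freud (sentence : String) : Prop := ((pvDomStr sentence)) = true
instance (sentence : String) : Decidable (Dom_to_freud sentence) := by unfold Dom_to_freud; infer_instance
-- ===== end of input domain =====

-- B builds the answer in one pass with a string accumulator (no count, no replicate list, no join) — a simpler decomposition of the same task.

-- ===== PORT A =====
def to_freud (sentence : String) : String :=
  let s := sentence.toList
  let count : Int := (PySem.List.pyRange 0 (PySem.List.len s)).foldl
      (fun c i => if PySem.List.pyGetD s i ' ' = ' ' then c + 1 else c) 0
  let output : List String := (PySem.List.pyRange 0 (count + 1)).foldl
      (fun out _ => out ++ ["sex"]) []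
  PySem.Str.join " " output

-- ===== PORT B =====
def to_freud_alt (sentence : String) : String :=
  sentence.toList.foldl (fun out ch => if ch = ' ' then out ++ " sex" else out) "sex"

-- ===== PRECONDITION & SPEC =====
def Spec_to_freud (sentence : String) (out : String) : Prop := out = to_freud_alt sentence
instance (sentence : String) (out : String) : Decidable (Spec_to_freud sentence out) := by unfold Spec_to_freud; infer_instance

-- ===== CLAIM (what is proved, stated in full; the proofs are below) =====
def Claim_equal_to_freud : Prop := ∀ (sentence : String), Dom_to_freud sentence → Spec_to_freud sentence (to_freud sentence)

-- ===== LEMMAS AND PROOFS =====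

-- A's counting loop computes the number of spaces
theorem pv_count_fold (cs : List Char) (c : Int) :
    cs.foldl (fun c ch => if ch = ' ' then c + 1 else c) c = c + cs.count ' ' := by
  induction cs generalizing c with
  | nil => simp
  | cons x xs ih =>
    simp only [List.foldl_cons, List.count_cons, ih]
    by_cases hx : x = ' '
    · simp [hx]; ring
    · simp [hx]

-- A's replicate loop builds a list of n copies of "sex"
theorem pv_repl_fold (n : Nat) (out : List String) :
    (PySem.List.pyRange 0 (n : Int)).foldl (fun out _ => out ++ ["sex"]) out
      = out ++ List.replicate n "sex" := by
  induction n generalizing out with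
  | zero => simp [PySem.List.pyRange_one_eq_nil]
  | succ m ih =>
    have : ((m : Int) + 1) = ((m + 1 : Nat) : Int) := by push_cast; ring
    rw [← this, PySem.List.pyRange_one_succ_right (by positivity),
        List.foldl_append, ih]
    simp [List.replicate_succ']

-- joining n+1 copies of "sex" with spaces, as a list of characters
theorem pv_join_replicate (n : Nat) :
    PySem.Chars.join [' '] (List.replicate (n + 1) "sex".toList)
      = "sex".toList ++ (List.replicate n " sex".toList).flatten := by
  induction n with
  | zero => simp [PySem.Chars.join_singleton]
  | succ m ih =>
    rw [List.replicate_succ, List.replicate_succ, PySem.Chars.join_cons_cons,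
        ← List.replicate_succ, ih]
    simp [List.replicate_succ]

-- B's accumulating pass, characterised on characters
theorem pv_alt_fold (cs : List Char) (out : String) :
    (cs.foldl (fun out ch => if ch = ' ' then out ++ " sex" else out) out).toList
      = out.toList ++ (List.replicate (cs.count ' ') " sex".toList).flatten := by
  induction cs generalizing out with
  | nil => simp
  | cons x xs ih =>
    simp only [List.foldl_cons, List.count_cons]
    by_cases hx : x = ' '
    · simp only [hx, if_pos rfl, ih, String.toList_append, beq_self_eq_true, if_true]
      simp [List.replicate_succ]
    · simp [hx, ih]

-- ===== VERDICT (by name: the statement is the Claim_ definition above) =====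
theorem to_freud_spec : Claim_equal_to_freud := by
  intro sentence _
  unfold Spec_to_freud to_freud to_freud_alt
  apply String.toList_inj.mp
  dsimp only
  rw [PySem.List.foldl_pyRange_pyGetD sentence.toList ' '
        (fun c ch => if ch = ' ' then c + 1 else c) 0 le_rfl]
  simp only [Int.toNat_zero, List.drop_zero]
  rw [pv_count_fold]
  have hn : ((0 : Int) + sentence.toList.count ' ' + 1)
      = ((sentence.toList.count ' ' + 1 : Nat) : Int) := by push_cast; ring
  rw [hn, pv_repl_fold, List.nil_append, PySem.Str.toList_join, List.map_replicate,
      show (" ").toList = [' '] from rfl,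
      pv_join_replicate, pv_alt_fold]
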